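-- pv_equiv track=rewrite | github.com/faulknco/ising-rs | analysis/graphs/gen_fcc.py | fcc_edges
-- ===== SOURCE A (Python) =====
-- NN_OFFSETS = [
--     (s1, s2, 0) for s1 in (1,-1) for s2 in (1,-1)
-- ] + [
--     (s1, 0, s2) for s1 in (1,-1) for s2 in (1,-1)
-- ] + [
--     (0, s1, s2) for s1 in (1,-1) for s2 in (1,-1)
-- ]  # 12 offsets
--
-- def fcc_edges(n):
--     """Build FCC adjacency list for n^3 unit cells with PBC."""
--     L = 2 * n  # grid side in half-lattice units
--
--     # Build position -> index map
--     pos_to_idx = {}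
--     positions = []
--
--     for i in range(n):
--         for j in range(n):
--             for k in range(n):
--                 for atom in [
--                     (2*i,   2*j,   2*k  ),   # corner
--                     (2*i+1, 2*j+1, 2*k  ),   # xy-face
--                     (2*i+1, 2*j,   2*k+1),   # xz-face
--                     (2*i,   2*j+1, 2*k+1),   # yz-face
--                 ]:
--                     pos_to_idx[atom] = len(positions)
--                     positions.append(atom)
--
--     edges = set()
--     for pos, idx_a in pos_to_idx.items():
--         x, y, z = pos
--         for dx, dy, dz in NN_OFFSETS:
--             nb = ((x + dx) % L, (y + dy) % L, (z + dz) % L)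
--             if nb in pos_to_idx:
--                 idx_b = pos_to_idx[nb]
--                 edges.add((min(idx_a, idx_b), max(idx_a, idx_b)))
--
--     return list(edges)
-- ===== SOURCE B (Python) =====
-- NN_OFFSETS = [
--     (s1, s2, 0) for s1 in (1,-1) for s2 in (1,-1)
-- ] + [
--     (s1, 0, s2) for s1 in (1,-1) for s2 in (1,-1)
-- ] + [
--     (0, s1, s2) for s1 in (1,-1) for s2 in (1,-1)
-- ]  # 12 offsets
--
--
-- def fcc_edges(n):
--     """Build FCC adjacency list for n^3 unit cells with PBC, by direct
--     arithmetic addressing (no position->index dict)."""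
--     L = 2 * n
--     edges = set()
--     for i in range(n):
--         for j in range(n):
--             for k in range(n):
--                 base = ((i * n + j) * n + k) * 4
--                 for t, (x, y, z) in enumerate([
--                     (2*i,   2*j,   2*k  ),
--                     (2*i+1, 2*j+1, 2*k  ),
--                     (2*i+1, 2*j,   2*k+1),
--                     (2*i,   2*j+1, 2*k+1),
--                 ]):
--                     idx_a = base + t
--                     for dx, dy, dz in NN_OFFSETS:
--                         xx = (x + dx) % L
--                         yy = (y + dy) % L
--                         zz = (z + dz) % L
--                         px, py, pz = xx % 2, yy % 2, zz % 2
--                         t2 = px*py + 2*px*pz + 3*py*pz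
--                         idx_b = ((xx//2 * n + yy//2) * n + zz//2) * 4 + t2
--                         edges.add((idx_a, idx_b) if idx_a < idx_b else (idx_b, idx_a))
--     return list(edges)
-- ===== Notes on version B (the rewrite author's own statement) =====
-- stated objective: alternative
-- what changed: B drops A's position-to-index dict and positions list entirely and addresses atoms by closed-form arithmetic: each atom's index is computed directly from its cell coordinates and basis slot, and a neighbor's index is recovered from its periodic coordinates via parity (atom type) and halved-coordinate (cell) arithmetic, relying on the proved fact that every FCC+PBC neighbor exists.
import Mathlib
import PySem

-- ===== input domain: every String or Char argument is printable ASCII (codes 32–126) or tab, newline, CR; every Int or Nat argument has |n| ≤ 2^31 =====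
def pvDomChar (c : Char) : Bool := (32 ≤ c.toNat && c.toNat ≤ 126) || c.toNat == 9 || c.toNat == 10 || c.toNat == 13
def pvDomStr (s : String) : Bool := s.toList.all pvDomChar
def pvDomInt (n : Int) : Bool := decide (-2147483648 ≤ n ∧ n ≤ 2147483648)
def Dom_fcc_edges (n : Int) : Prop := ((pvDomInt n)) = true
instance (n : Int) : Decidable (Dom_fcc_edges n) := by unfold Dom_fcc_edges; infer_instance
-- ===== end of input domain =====

-- B replaces A's position→index dict by closed-form arithmetic addressing of atoms
-- (index from cell coordinates and parity); same return value, similar cost (no speed claim).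

-- ===== PORT A =====
-- shared module constant NN_OFFSETS, written out (the Python comprehension's order)
def pvNNOffsets : List (Int × Int × Int) :=
  [(1, 1, 0), (1, -1, 0), (-1, 1, 0), (-1, -1, 0),
   (1, 0, 1), (1, 0, -1), (-1, 0, 1), (-1, 0, -1),
   (0, 1, 1), (0, 1, -1), (0, -1, 1), (0, -1, -1)]

-- the four-atom basis of cell (i, j, k), the literal list both Pythons contain
def pvAtoms (i j k : Int) : List (Int × Int × Int) :=
  [(2*i,   2*j,   2*k),
   (2*i+1, 2*j+1, 2*k),
   (2*i+1, 2*j,   2*k+1),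
   (2*i,   2*j+1, 2*k+1)]

-- A's innermost loop body: pos_to_idx[atom] = len(positions); positions.append(atom)
def pvStepA (st : PySem.Dict (Int × Int × Int) Int × List (Int × Int × Int))
    (atom : Int × Int × Int) :
    PySem.Dict (Int × Int × Int) Int × List (Int × Int × Int) :=
  (st.1.insert atom (st.2.length : Int), st.2 ++ [atom])

-- A's edge loop body for one (pos, idx_a) item: the 12-offset scan with the dict lookup
def pvEdgeA (L : Int) (d : PySem.Dict (Int × Int × Int) Int)
    (edges : PySem.Set (Int × Int)) (pi : (Int × Int × Int) × Int) : PySem.Set (Int × Int) :=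
  pvNNOffsets.foldl (fun edges off =>
    let nb := (PySem.Int.mod (pi.1.1 + off.1) L, PySem.Int.mod (pi.1.2.1 + off.2.1) L,
               PySem.Int.mod (pi.1.2.2 + off.2.2) L)
    match d.get? nb with
    | some idx_b => PySem.Set.add edges (min pi.2 idx_b, max pi.2 idx_b)
    | none => edges) edges

def fcc_edges (n : Int) : List (Int × Int) :=
  let L := 2 * n
  let st := (PySem.List.pyRange 0 n).foldl (fun st i =>
      (PySem.List.pyRange 0 n).foldl (fun st j =>
        (PySem.List.pyRange 0 n).foldl (fun st k =>
          (pvAtoms i j k).foldl pvStepA st) st) st)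
    (PySem.Dict.empty, ([] : List (Int × Int × Int)))
  st.1.items.foldl (pvEdgeA L st.1) PySem.Set.empty

-- ===== PORT B =====
-- parity triple → atom type: (0,0,0)↦0, (1,1,0)↦1, (1,0,1)↦2, (0,1,1)↦3
def pvType2 (px py pz : Int) : Int := px*py + 2*px*pz + 3*py*pz

-- B's 12-offset scan for one atom at (x,y,z) with index idx_a: arithmetic neighbor index
def pvEdgeB (n L : Int) (edges : PySem.Set (Int × Int)) (idx_a : Int) (a : Int × Int × Int) :
    PySem.Set (Int × Int) :=
  pvNNOffsets.foldl (fun edges off =>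
    let xx := PySem.Int.mod (a.1 + off.1) L
    let yy := PySem.Int.mod (a.2.1 + off.2.1) L
    let zz := PySem.Int.mod (a.2.2 + off.2.2) L
    let t2 := pvType2 (PySem.Int.mod xx 2) (PySem.Int.mod yy 2) (PySem.Int.mod zz 2)
    let idx_b := (PySem.Int.floordiv xx 2 * n + PySem.Int.floordiv yy 2) * n
                   + PySem.Int.floordiv zz 2
    let idx_b := idx_b * 4 + t2
    PySem.Set.add edges (if idx_a < idx_b then (idx_a, idx_b) else (idx_b, idx_a))) edges

def fcc_edges_alt (n : Int) : List (Int × Int) :=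
  let L := 2 * n
  (PySem.List.pyRange 0 n).foldl (fun edges i =>
    (PySem.List.pyRange 0 n).foldl (fun edges j =>
      (PySem.List.pyRange 0 n).foldl (fun edges k =>
        let base := ((i * n + j) * n + k) * 4
        (PySem.List.enumerate (pvAtoms i j k)).foldl
          (fun edges ta => pvEdgeB n L edges (base + ta.1) ta.2) edges) edges) edges)
    (PySem.Set.empty : PySem.Set (Int × Int))

-- ===== PRECONDITION & SPEC =====
def Spec_fcc_edges (n : Int) (out : List (Int × Int)) : Prop := out = fcc_edges_alt n
instance (n : Int) (out : List (Int × Int)) : Decidable (Spec_fcc_edges n out) := by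
  unfold Spec_fcc_edges; infer_instance

-- ===== CLAIM (what is proved, stated in full; the proofs are below) =====
def Claim_equal_fcc_edges : Prop := ∀ (n : Int), Dom_fcc_edges n → Spec_fcc_edges n (fcc_edges n)

-- ===== LEMMAS AND PROOFS =====

-- arithmetic index of the atom at half-lattice position p (B's idx_b formula, over ediv/emod)
def pvDec (n : Int) (p : Int × Int × Int) : Int :=
  ((p.1 / 2 * n + p.2.1 / 2) * n + p.2.2 / 2) * 4
    + pvType2 (p.1 % 2) (p.2.1 % 2) (p.2.2 % 2)

-- all atoms in A's insertion order, and the same list paired with pvDec values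
def pvK (m : Nat) (i j : Int) : List (Int × Int × Int) :=
  (List.range m).flatMap (fun (k : Nat) => pvAtoms i j (k : Int))
def pvJ (m : Nat) (i : Int) : List (Int × Int × Int) :=
  (List.range m).flatMap (fun (j : Nat) => pvK m i (j : Int))
def pvAll (m : Nat) : List (Int × Int × Int) :=
  (List.range m).flatMap (fun (i : Nat) => pvJ m (i : Int))

def pvLeaf (n : Int) (i j k : Int) : List ((Int × Int × Int) × Int) :=
  (pvAtoms i j k).map (fun a => (a, pvDec n a))
def pvGK (n : Int) (m : Nat) (i j : Int) : List ((Int × Int × Int) × Int) :=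
  (List.range m).flatMap (fun (k : Nat) => pvLeaf n i j (k : Int))
def pvGJ (n : Int) (m : Nat) (i : Int) : List ((Int × Int × Int) × Int) :=
  (List.range m).flatMap (fun (j : Nat) => pvGK n m i (j : Int))
def pvGen (n : Int) (m : Nat) : List ((Int × Int × Int) × Int) :=
  (List.range m).flatMap (fun (i : Nat) => pvGJ n m (i : Int))

-- sequential tagging: positions paired with their running index
def pvTag (c : Nat) : List (Int × Int × Int) → List ((Int × Int × Int) × Int)
  | [] => []
  | a :: as => (a, (c : Int)) :: pvTag (c + 1) as

theorem pvTag_append (xs ys : List (Int × Int × Int)) : ∀ c,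
    pvTag c (xs ++ ys) = pvTag c xs ++ pvTag (c + xs.length) ys := by
  induction xs with
  | nil => simp [pvTag]
  | cons a as ih => intro c; simp [pvTag, ih (c+1)]; ring_nf

theorem pvLenK (i j : Int) : ∀ (mk : Nat),
    ((List.range mk).flatMap (fun (k : Nat) => pvAtoms i j (k : Int))).length = 4 * mk := by
  intro mk
  induction mk with
  | zero => simp
  | succ mk ih => simp [List.range_succ, pvAtoms]; ring

theorem pvDec_atom0 (n i j k : Int) : pvDec n (2*i, 2*j, 2*k) = ((i*n+j)*n+k)*4 := by
  have h1 : (2*i)/2 = i := by omega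
  have h2 : (2*j)/2 = j := by omega
  have h3 : (2*k)/2 = k := by omega
  have m1 : (2*i) % 2 = 0 := by omega
  have m2 : (2*j) % 2 = 0 := by omega
  have m3 : (2*k) % 2 = 0 := by omega
  simp [pvDec, pvType2, h1, h2, h3, m1, m2, m3]

theorem pvDec_atom1 (n i j k : Int) : pvDec n (2*i+1, 2*j+1, 2*k) = ((i*n+j)*n+k)*4 + 1 := by
  have h1 : (2*i+1)/2 = i := by omega
  have h2 : (2*j+1)/2 = j := by omega
  have h3 : (2*k)/2 = k := by omega
  have m1 : (2*i+1) % 2 = 1 := by omega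
  have m2 : (2*j+1) % 2 = 1 := by omega
  have m3 : (2*k) % 2 = 0 := by omega
  simp [pvDec, pvType2, h1, h2, h3, m1, m2, m3]

theorem pvDec_atom2 (n i j k : Int) : pvDec n (2*i+1, 2*j, 2*k+1) = ((i*n+j)*n+k)*4 + 2 := by
  have h1 : (2*i+1)/2 = i := by omega
  have h2 : (2*j)/2 = j := by omega
  have h3 : (2*k+1)/2 = k := by omega
  have m1 : (2*i+1) % 2 = 1 := by omega
  have m2 : (2*j) % 2 = 0 := by omega
  have m3 : (2*k+1) % 2 = 1 := by omega
  simp [pvDec, pvType2, h1, h2, h3, m1, m2, m3]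

theorem pvDec_atom3 (n i j k : Int) : pvDec n (2*i, 2*j+1, 2*k+1) = ((i*n+j)*n+k)*4 + 3 := by
  have h1 : (2*i)/2 = i := by omega
  have h2 : (2*j+1)/2 = j := by omega
  have h3 : (2*k+1)/2 = k := by omega
  have m1 : (2*i) % 2 = 0 := by omega
  have m2 : (2*j+1) % 2 = 1 := by omega
  have m3 : (2*k+1) % 2 = 1 := by omega
  simp [pvDec, pvType2, h1, h2, h3, m1, m2, m3]

theorem pvTag_leaf (n i j k : Int) (c : Nat) (hc : (c : Int) = ((i*n + j)*n + k)*4) :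
    pvTag c (pvAtoms i j k) = pvLeaf n i j k := by
  simp only [pvTag, pvAtoms, pvLeaf, List.map_cons, List.map_nil,
    pvDec_atom0, pvDec_atom1, pvDec_atom2, pvDec_atom3, List.cons.injEq,
    Prod.mk.injEq, and_true, true_and]
  push_cast
  and_intros <;> linear_combination hc

theorem pvLenJ (m : Nat) (i : Int) : ∀ (mj : Nat),
    ((List.range mj).flatMap (fun (j : Nat) => pvK m i (j : Int))).length = 4 * m * mj := by
  intro mj
  induction mj with
  | zero => simp
  | succ mj ih =>
      rw [List.range_succ, List.flatMap_append, List.length_append, ih]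
      simp only [List.flatMap_cons, List.flatMap_nil, List.append_nil, pvK, pvLenK]
      ring

theorem pvLenI (m : Nat) : ∀ (mi : Nat),
    ((List.range mi).flatMap (fun (i : Nat) => pvJ m (i : Int))).length = 4 * m * m * mi := by
  intro mi
  induction mi with
  | zero => simp
  | succ mi ih =>
      rw [List.range_succ, List.flatMap_append, List.length_append, ih]
      simp only [List.flatMap_cons, List.flatMap_nil, List.append_nil, pvJ, pvLenJ]
      ring

theorem pvTagK (n : Int) (i j : Int) : ∀ (mk : Nat) (c : Nat),
    (c : Int) = ((i*n + j)*n)*4 →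
    pvTag c ((List.range mk).flatMap (fun (k : Nat) => pvAtoms i j (k : Int))) =
      (List.range mk).flatMap (fun (k : Nat) => pvLeaf n i j (k : Int)) := by
  intro mk
  induction mk with
  | zero => intro c _; simp [pvTag]
  | succ mk ih =>
      intro c hc
      rw [List.range_succ, List.flatMap_append, List.flatMap_append,
        pvTag_append, ih c hc, pvLenK]
      simp only [List.flatMap_cons, List.flatMap_nil, List.append_nil]
      rw [pvTag_leaf n i j (mk : Int) (c + 4*mk) (by push_cast; linear_combination hc)]

theorem pvTagJ (n : Int) (m : Nat) (hm : n = (m : Int)) (i : Int) : ∀ (mj : Nat) (c : Nat),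
    (c : Int) = ((i*n)*n)*4 →
    pvTag c ((List.range mj).flatMap (fun (j : Nat) => pvK m i (j : Int))) =
      (List.range mj).flatMap (fun (j : Nat) => pvGK n m i (j : Int)) := by
  intro mj
  induction mj with
  | zero => intro c _; simp [pvTag]
  | succ mj ih =>
      intro c hc
      rw [List.range_succ, List.flatMap_append, List.flatMap_append,
        pvTag_append, ih c hc, pvLenJ]
      simp only [List.flatMap_cons, List.flatMap_nil, List.append_nil, pvK, pvGK]
      rw [pvTagK n i (mj : Int) m (c + 4*m*mj)
        (by push_cast; linear_combination hc - 4*(mj:Int)*hm)]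

theorem pvTagAll (n : Int) (m : Nat) (hm : n = (m : Int)) :
    pvTag 0 (pvAll m) = pvGen n m := by
  have main : ∀ (mi : Nat) (c : Nat), (c : Int) = 0 →
      pvTag c ((List.range mi).flatMap (fun (i : Nat) => pvJ m (i : Int))) =
        (List.range mi).flatMap (fun (i : Nat) => pvGJ n m (i : Int)) := by
    intro mi
    induction mi with
    | zero => intro c _; simp [pvTag]
    | succ mi ih =>
        intro c hc
        rw [List.range_succ, List.flatMap_append, List.flatMap_append,
          pvTag_append, ih c hc, pvLenI]
        simp only [List.flatMap_cons, List.flatMap_nil, List.append_nil, pvJ, pvGJ]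
        rw [pvTagJ n m hm (mi : Int) m (c + 4*m*m*mi)
          (by push_cast; linear_combination hc - 4*(mi:Int)*((m:Int)+n)*hm)]
  exact main m 0 (by simp)

theorem pvIns (as : List (Int × Int × Int)) :
    ∀ (d : PySem.Dict (Int × Int × Int) Int) (ps : List (Int × Int × Int)),
    (d.keys ++ as).Nodup →
    (as.foldl pvStepA (d, ps)).1.items = d.items ++ pvTag ps.length as ∧
    (as.foldl pvStepA (d, ps)).1.keys = d.keys ++ as ∧
    (as.foldl pvStepA (d, ps)).2 = ps ++ as := by
  induction as with
  | nil => intro d ps _; simp [pvTag]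
  | cons a as ih =>
      intro d ps hnd
      have hmem : a ∉ d.keys := by
        intro h
        exact (List.disjoint_of_nodup_append hnd) h (by simp)
      have hc : d.contains a = false := by
        rw [PySem.Dict.contains_eq_decide_mem_keys]; simpa using hmem
      have hnd' : ((d.insert a (ps.length : Int)).keys ++ as).Nodup := by
        rw [PySem.Dict.keys_insert_of_not_contains d _ hc]
        have : d.keys ++ a :: as = (d.keys ++ [a]) ++ as := by simp
        rw [← this]; exact hnd
      have := ih (d.insert a (ps.length : Int)) (ps ++ [a]) hnd'
      simp only [List.foldl_cons, pvStepA] at *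
      refine ⟨?_, ?_, ?_⟩
      · rw [this.1, PySem.Dict.items_insert_of_not_contains d _ hc]
        simp [pvTag, List.length_append]
      · rw [this.2.1, PySem.Dict.keys_insert_of_not_contains d _ hc]
        simp
      · rw [this.2.2]; simp

theorem pvTag_snd : ∀ (xs : List (Int × Int × Int)) (c : Nat),
    (pvTag c xs).map Prod.snd = (List.range xs.length).map (fun (t : Nat) => ((c + t : Nat) : Int)) := by
  intro xs
  induction xs with
  | nil => intro c; simp [pvTag]
  | cons a as ih =>
      intro c
      simp only [pvTag, List.map_cons, ih (c+1), List.length_cons,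
        List.range_succ_eq_map, List.map_map]
      refine List.cons_eq_cons.mpr ⟨by norm_num, ?_⟩
      apply List.map_congr_left
      intro t _
      simp only [Function.comp_apply, Nat.succ_eq_add_one]
      congr 1
      omega

theorem pvGen_eq_map (n : Int) (m : Nat) :
    pvGen n m = (pvAll m).map (fun a => (a, pvDec n a)) := by
  simp [pvGen, pvGJ, pvGK, pvLeaf, pvAll, pvJ, pvK, List.map_flatMap]

theorem pvAll_nodup (n : Int) (m : Nat) (hm : n = (m : Int)) : (pvAll m).Nodup := by
  have h1 : (pvAll m).map (fun a => pvDec n a) =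
      (List.range (pvAll m).length).map (fun (t : Nat) => ((0 + t : Nat) : Int)) := by
    have := congrArg (List.map Prod.snd) (pvTagAll n m hm)
    rw [pvTag_snd (pvAll m) 0, pvGen_eq_map, List.map_map] at this
    exact this.symm
  have h2 : ((pvAll m).map (fun a => pvDec n a)).Nodup := by
    rw [h1]
    exact List.Nodup.map (by intro x y h; simpa using h) List.nodup_range
  exact h2.of_map _

theorem pvFoldA (m : Nat) (st0 : PySem.Dict (Int × Int × Int) Int × List (Int × Int × Int)) :
    (List.range m).foldl (fun st (i : Nat) =>
      (List.range m).foldl (fun st (j : Nat) =>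
        (List.range m).foldl (fun st (k : Nat) =>
          (pvAtoms (i : Int) (j : Int) (k : Int)).foldl pvStepA st) st) st) st0
    = (pvAll m).foldl pvStepA st0 := by
  simp only [pvAll, pvJ, pvK, List.foldl_flatMap]

theorem pvLeafB (n L i j k : Int) (edges : PySem.Set (Int × Int)) :
    (PySem.List.enumerate (pvAtoms i j k)).foldl
      (fun e ta => pvEdgeB n L e (((i*n+j)*n+k)*4 + ta.1) ta.2) edges
    = (pvLeaf n i j k).foldl (fun e p => pvEdgeB n L e p.2 p.1) edges := by
  simp [pvAtoms, pvLeaf, PySem.List.enumerate, pvDec_atom0, pvDec_atom1, pvDec_atom2,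
    pvDec_atom3]

theorem pvFoldB (n L : Int) (m : Nat) (e0 : PySem.Set (Int × Int)) :
    (List.range m).foldl (fun edges (i : Nat) =>
      (List.range m).foldl (fun edges (j : Nat) =>
        (List.range m).foldl (fun edges (k : Nat) =>
          (PySem.List.enumerate (pvAtoms (i : Int) (j : Int) (k : Int))).foldl
            (fun e ta => pvEdgeB n L e ((((i : Int) * n + (j : Int)) * n + (k : Int)) * 4 + ta.1) ta.2)
            edges) edges) edges) e0
    = (pvGen n m).foldl (fun e p => pvEdgeB n L e p.2 p.1) e0 := by
  simp only [pvGen, pvGJ, pvGK, List.foldl_flatMap]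
  apply PySem.List.foldl_congr_mem
  intro acc i _
  apply PySem.List.foldl_congr_mem
  intro acc j _
  apply PySem.List.foldl_congr_mem
  intro acc k _
  exact pvLeafB n L _ _ _ acc

theorem pvMemGen (n : Int) (m : Nat) (hm : n = (m : Int)) (x y z : Int)
    (hx0 : 0 ≤ x) (hx : x < 2*n) (hy0 : 0 ≤ y) (hy : y < 2*n)
    (hz0 : 0 ≤ z) (hz : z < 2*n) (hpar : (x + y + z) % 2 = 0) :
    ((x, y, z), pvDec n (x, y, z)) ∈ pvGen n m := by
  simp only [pvGen, pvGJ, pvGK, pvLeaf, List.mem_flatMap, List.mem_range, List.mem_map,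
    pvAtoms, List.mem_cons, List.not_mem_nil, or_false]
  refine ⟨(x/2).toNat, by omega, (y/2).toNat, by omega, (z/2).toNat, by omega, ?_⟩
  rcases Int.emod_two_eq x with px0 | px1 <;> rcases Int.emod_two_eq y with py0 | py1 <;>
    rcases Int.emod_two_eq z with pz0 | pz1
  · exact ⟨(x,y,z), Or.inl (by refine Prod.ext ?_ (Prod.ext ?_ ?_) <;> simp <;> omega), rfl⟩
  · omega
  · omega
  · exact ⟨(x,y,z), Or.inr (Or.inr (Or.inr (by refine Prod.ext ?_ (Prod.ext ?_ ?_) <;> simp <;> omega))), rfl⟩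
  · omega
  · exact ⟨(x,y,z), Or.inr (Or.inr (Or.inl (by refine Prod.ext ?_ (Prod.ext ?_ ?_) <;> simp <;> omega))), rfl⟩
  · exact ⟨(x,y,z), Or.inr (Or.inl (by refine Prod.ext ?_ (Prod.ext ?_ ?_) <;> simp <;> omega)), rfl⟩
  · omega

theorem pvGet (n : Int) (m : Nat) (hm : n = (m : Int)) (d : PySem.Dict (Int × Int × Int) Int)
    (hitems : d.items = pvGen n m) (x y z : Int)
    (hx0 : 0 ≤ x) (hx : x < 2*n) (hy0 : 0 ≤ y) (hy : y < 2*n)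
    (hz0 : 0 ≤ z) (hz : z < 2*n) (hpar : (x + y + z) % 2 = 0) :
    d.get? (x, y, z) = some (pvDec n (x, y, z)) := by
  apply PySem.Dict.get?_of_mem_items
  · rw [hitems]; exact pvMemGen n m hm x y z hx0 hx hy0 hy hz0 hz hpar
  · have : d.keys = pvAll m := by
      simp [PySem.Dict.keys, hitems, pvGen_eq_map, List.map_map, Function.comp_def]
    rw [this]; exact pvAll_nodup n m hm

theorem pvMinMax (v w : Int) : (min v w, max v w) = if v < w then (v, w) else (w, v) := by
  split_ifs with h <;> refine Prod.ext ?_ ?_ <;> simp [min_def, max_def] <;> omega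

theorem pvAll_bounds (m : Nat) (a : Int × Int × Int) (ha : a ∈ pvAll m) :
    0 ≤ a.1 ∧ a.1 < 2*(m : Int) ∧ 0 ≤ a.2.1 ∧ a.2.1 < 2*(m : Int) ∧
    0 ≤ a.2.2 ∧ a.2.2 < 2*(m : Int) ∧ (a.1 + a.2.1 + a.2.2) % 2 = 0 := by
  simp only [pvAll, pvJ, pvK, List.mem_flatMap, List.mem_range, pvAtoms,
    List.mem_cons, List.not_mem_nil, or_false] at ha
  obtain ⟨i, hi, j, hj, k, hk, hcase⟩ := ha
  rcases hcase with h | h | h | h <;> subst h <;> simp <;> omega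

theorem pvOffPar (off : Int × Int × Int) (hoff : off ∈ pvNNOffsets) :
    (off.1 + off.2.1 + off.2.2) % 2 = 0 := by
  fin_cases hoff <;> decide

theorem pvEdgeAB (n : Int) (m : Nat) (hm : n = (m : Int)) (hn : 0 < n)
    (d : PySem.Dict (Int × Int × Int) Int) (hitems : d.items = pvGen n m)
    (p : (Int × Int × Int) × Int) (hp : p ∈ pvGen n m) (edges : PySem.Set (Int × Int)) :
    pvEdgeA (2*n) d edges p = pvEdgeB n (2*n) edges p.2 p.1 := by
  have hpa : p.1 ∈ pvAll m ∧ p.2 = pvDec n p.1 := by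
    rw [pvGen_eq_map] at hp
    obtain ⟨a, ha, hEq⟩ := List.mem_map.mp hp
    exact ⟨by rw [← hEq]; exact ha, by rw [← hEq]⟩
  obtain ⟨hx0, hx, hy0, hy, hz0, hz, hpar⟩ := pvAll_bounds m p.1 hpa.1
  rw [← hm] at hx hy hz
  have h2n : (0:Int) < 2*n := by omega
  unfold pvEdgeA pvEdgeB
  apply PySem.List.foldl_congr_mem
  intro acc off hoff
  have hop := pvOffPar off hoff
  simp only [PySem.Int.mod_eq_emod_of_pos h2n, PySem.Int.mod_eq_emod_of_pos (by norm_num : (0:Int) < 2),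
    PySem.Int.floordiv_eq_ediv_of_pos (by norm_num : (0:Int) < 2)]
  have e1 : (p.1.1 + off.1) % (2*n) % 2 = (p.1.1 + off.1) % 2 :=
    Int.emod_emod_of_dvd _ (dvd_mul_right 2 n)
  have e2 : (p.1.2.1 + off.2.1) % (2*n) % 2 = (p.1.2.1 + off.2.1) % 2 :=
    Int.emod_emod_of_dvd _ (dvd_mul_right 2 n)
  have e3 : (p.1.2.2 + off.2.2) % (2*n) % 2 = (p.1.2.2 + off.2.2) % 2 :=
    Int.emod_emod_of_dvd _ (dvd_mul_right 2 n)
  have hget : d.get? ((p.1.1 + off.1) % (2*n), (p.1.2.1 + off.2.1) % (2*n),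
      (p.1.2.2 + off.2.2) % (2*n)) = some (pvDec n ((p.1.1 + off.1) % (2*n),
      (p.1.2.1 + off.2.1) % (2*n), (p.1.2.2 + off.2.2) % (2*n))) := by
    apply pvGet n m hm d hitems
    · exact Int.emod_nonneg _ (by omega)
    · exact Int.emod_lt_of_pos _ h2n
    · exact Int.emod_nonneg _ (by omega)
    · exact Int.emod_lt_of_pos _ h2n
    · exact Int.emod_nonneg _ (by omega)
    · exact Int.emod_lt_of_pos _ h2n
    · omega
  rw [hget]
  show acc.add (min p.2 _, max p.2 _) = _
  rw [hpa.2, pvMinMax]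
  rfl

theorem pvRangeNil (n : Int) (hn : ¬ 0 < n) : PySem.List.pyRange 0 n = [] := by
  simp [PySem.List.pyRange]; omega

theorem fcc_edges_spec : Claim_equal_fcc_edges := by
  intro n _
  unfold Spec_fcc_edges
  by_cases hn : 0 < n
  · set m := n.toNat with hmdef
    have hm : n = (m : Int) := (Int.toNat_of_nonneg hn.le).symm
    have hrange : PySem.List.pyRange 0 n = (List.range m).map (fun (k : Nat) => (k : Int)) := by
      rw [hm]; exact PySem.List.pyRange_zero_natCast m
    rw [fcc_edges, fcc_edges_alt]
    simp only [hrange, List.foldl_map]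
    rw [pvFoldA m (PySem.Dict.empty, [])]
    rw [pvFoldB n (2*n) m PySem.Set.empty]
    have hins := pvIns (pvAll m) PySem.Dict.empty []
      (by simpa [PySem.Dict.keys_empty] using pvAll_nodup n m hm)
    have hitems : ((pvAll m).foldl pvStepA (PySem.Dict.empty, [])).1.items = pvGen n m := by
      rw [hins.1]
      show PySem.Dict.empty.items ++ pvTag 0 (pvAll m) = pvGen n m
      rw [pvTagAll n m hm]; rfl
    rw [hitems]
    apply PySem.List.foldl_congr_mem
    intro acc p hp
    exact pvEdgeAB n m hm hn _ hitems p hp acc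
  · rw [fcc_edges, fcc_edges_alt]
    simp [pvRangeNil n hn, PySem.Dict.empty]
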